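-- pv_equiv track=rewrite | github.com/Bencode92/stock-analysis-platform | portfolio_engine/preset_meta.py | deduplicate_etf_by_exposure
-- ===== SOURCE A (Python) =====
-- from typing import Dict, List, Tuple, Optional, Set
--
-- ETF_EXPOSURE_EQUIVALENTS: Dict[str, List[str]] = {
--     "gold": ["GLD", "IAU", "GLDM", "SGOL", "IAUM", "AAAU"],
--     "precious_metals": ["GLTR", "PPLT", "SLV"],
--     "world": ["URTH", "VT", "ACWI", "IWDA.L", "VWRL.L"],
--     "sp500": ["SPY", "IVV", "VOO"],
--     "nasdaq": ["QQQ", "ONEQ"],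
--     "emerging_markets": ["EEM", "VWO", "IEMG"],
--     "bonds_ig": ["LQD", "AGG", "BND"],
--     "bonds_treasury": ["TLT", "IEF", "SHY"],
--     "cash": ["BOXX", "BIL", "SHV"],
--     "dividend": ["VIG", "SCHD", "DVY", "SDY", "BINC"],
-- }
--
-- def deduplicate_etf_by_exposure(
--     etf_list: List[str],
--     exposures_wanted: Optional[Set[str]] = None
-- ) -> List[str]:
--     selected, exposures_covered = [], set()
--     for exposure, equivalents in ETF_EXPOSURE_EQUIVALENTS.items():
--         if exposures_wanted and exposure not in exposures_wanted:
--             continue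
--         for etf in equivalents:
--             if etf in etf_list and exposure not in exposures_covered:
--                 selected.append(etf)
--                 exposures_covered.add(exposure)
--                 break
--
--     known_etfs = {etf for eqs in ETF_EXPOSURE_EQUIVALENTS.values() for etf in eqs}
--     selected.extend(etf for etf in etf_list if etf not in known_etfs and etf not in selected)
--     return selected
-- ===== SOURCE B (Python) =====
-- from typing import Dict, List, Optional, Set, Tuple
--
-- ETF_EXPOSURE_EQUIVALENTS: Dict[str, List[str]] = {
--     "gold": ["GLD", "IAU", "GLDM", "SGOL", "IAUM", "AAAU"],
--     "precious_metals": ["GLTR", "PPLT", "SLV"],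
--     "world": ["URTH", "VT", "ACWI", "IWDA.L", "VWRL.L"],
--     "sp500": ["SPY", "IVV", "VOO"],
--     "nasdaq": ["QQQ", "ONEQ"],
--     "emerging_markets": ["EEM", "VWO", "IEMG"],
--     "bonds_ig": ["LQD", "AGG", "BND"],
--     "bonds_treasury": ["TLT", "IEF", "SHY"],
--     "cash": ["BOXX", "BIL", "SHV"],
--     "dividend": ["VIG", "SCHD", "DVY", "SDY", "BINC"],
-- }
--
-- # Reverse index built once: ticker -> (exposure, priority within its equivalence list).
-- _TICKER_INDEX: Dict[str, Tuple[str, int]] = {}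
-- for _exp, _eqs in ETF_EXPOSURE_EQUIVALENTS.items():
--     for _i, _t in enumerate(_eqs):
--         _TICKER_INDEX[_t] = (_exp, _i)
--
-- def deduplicate_etf_by_exposure(
--     etf_list: List[str],
--     exposures_wanted: Optional[Set[str]] = None
-- ) -> List[str]:
--     best = {}                 # exposure -> (priority, ticker), minimum priority seen
--     unknowns, seen = [], set()
--     for etf in etf_list:      # single pass over the input
--         info = _TICKER_INDEX.get(etf)
--         if info is None:
--             if etf not in seen:
--                 seen.add(etf)
--                 unknowns.append(etf)
--         else:
--             exp, pr = info
--             if not exposures_wanted or exp in exposures_wanted: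
--                 cur = best.get(exp)
--                 if cur is None or pr < cur[0]:
--                     best[exp] = (pr, etf)
--     out = [best[exp][1] for exp in ETF_EXPOSURE_EQUIVALENTS if exp in best]
--     return out + unknowns
-- ===== Notes on version B (the rewrite author's own statement) =====
-- stated objective: faster
-- what changed: Instead of scanning every equivalence list against the input and deduplicating unknowns with a quadratic 'not in selected' list test, B builds a reverse ticker->(exposure,priority) index once and makes a single pass over the input, keeping the minimum-priority present ticker per exposure in a dict and deduplicating unknown tickers with a set.
import Mathlib
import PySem

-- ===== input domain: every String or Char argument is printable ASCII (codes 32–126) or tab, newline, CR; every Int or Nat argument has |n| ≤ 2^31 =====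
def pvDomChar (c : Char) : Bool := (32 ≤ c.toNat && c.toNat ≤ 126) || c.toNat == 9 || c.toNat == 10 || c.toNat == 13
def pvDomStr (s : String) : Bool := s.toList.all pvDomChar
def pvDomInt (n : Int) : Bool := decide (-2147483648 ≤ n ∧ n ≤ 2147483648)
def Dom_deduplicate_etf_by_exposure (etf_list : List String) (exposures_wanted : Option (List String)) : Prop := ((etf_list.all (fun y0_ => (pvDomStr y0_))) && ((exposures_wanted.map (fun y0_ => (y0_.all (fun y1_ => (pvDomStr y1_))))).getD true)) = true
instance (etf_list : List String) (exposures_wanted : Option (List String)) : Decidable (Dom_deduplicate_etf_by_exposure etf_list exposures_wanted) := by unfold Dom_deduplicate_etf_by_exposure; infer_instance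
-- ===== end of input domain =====

-- B replaces A's scan of every equivalence list against the input (plus a quadratic
-- `not in selected` dedup) by a reverse ticker→(exposure,priority) index and one pass
-- over the input keeping the minimum-priority ticker per exposure (objective: faster).

-- ===== PORT A =====
def pvTable : List (String × List String) := [
  ("gold", ["GLD", "IAU", "GLDM", "SGOL", "IAUM", "AAAU"]),
  ("precious_metals", ["GLTR", "PPLT", "SLV"]),
  ("world", ["URTH", "VT", "ACWI", "IWDA.L", "VWRL.L"]),
  ("sp500", ["SPY", "IVV", "VOO"]),
  ("nasdaq", ["QQQ", "ONEQ"]),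
  ("emerging_markets", ["EEM", "VWO", "IEMG"]),
  ("bonds_ig", ["LQD", "AGG", "BND"]),
  ("bonds_treasury", ["TLT", "IEF", "SHY"]),
  ("cash", ["BOXX", "BIL", "SHV"]),
  ("dividend", ["VIG", "SCHD", "DVY", "SDY", "BINC"])]

-- inner `for etf in equivalents: … break` loop of A
def pvInnerA (etf_list : List String) (exposure : String) :
    List String → List String × PySem.Set String → List String × PySem.Set String
  | [], st => st
  | etf :: rest, st =>
    if etf_list.contains etf && !(PySem.Set.contains st.2 exposure) then
      (st.1 ++ [etf], PySem.Set.add st.2 exposure)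
    else pvInnerA etf_list exposure rest st

-- body of A's outer loop over ETF_EXPOSURE_EQUIVALENTS.items()
def pvStepA (etf_list : List String) (exposures_wanted : Option (List String))
    (st : List String × PySem.Set String) (p : String × List String) :
    List String × PySem.Set String :=
  if (match exposures_wanted with
      | none => false
      | some w => !w.isEmpty && !w.contains p.1) then st
  else pvInnerA etf_list p.1 p.2 st

-- known_etfs = {etf for eqs in … for etf in eqs}
def pvKnownA : PySem.Set String :=
  PySem.Set.ofList (pvTable.foldl (fun acc p => acc ++ p.2) [])

-- body of `selected.extend(etf for etf in etf_list if …)` (mutating generator)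
def pvExtStepA (sel : List String) (etf : String) : List String :=
  if !(PySem.Set.contains pvKnownA etf) && !sel.contains etf then sel ++ [etf] else sel

def deduplicate_etf_by_exposure (etf_list : List String) (exposures_wanted : Option (List String)) : List String :=
  let st := pvTable.foldl (pvStepA etf_list exposures_wanted) ([], PySem.Set.empty)
  etf_list.foldl pvExtStepA st.1

-- ===== PORT B =====
-- reverse index: ticker -> (exposure, priority), built once from the table
def pvIndexB : PySem.Dict String (String × Int) :=
  pvTable.foldl (fun d p =>
    (PySem.List.enumerate p.2).foldl (fun d it => d.insert it.2 (p.1, it.1)) d)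
    PySem.Dict.empty

-- `not exposures_wanted or exp in exposures_wanted`
def pvWantedB (exposures_wanted : Option (List String)) (e : String) : Bool :=
  match exposures_wanted with
  | none => true
  | some w => w.isEmpty || w.contains e

-- body of B's single pass: state = (best, unknowns, seen)
def pvStepB (exposures_wanted : Option (List String))
    (st : PySem.Dict String (Int × String) × List String × PySem.Set String)
    (etf : String) :
    PySem.Dict String (Int × String) × List String × PySem.Set String :=
  match pvIndexB.get? etf with
  | none =>
    if !(PySem.Set.contains st.2.2 etf) then
      (st.1, st.2.1 ++ [etf], PySem.Set.add st.2.2 etf)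
    else st
  | some info =>
    if pvWantedB exposures_wanted info.1 then
      match st.1.get? info.1 with
      | none => (st.1.insert info.1 (info.2, etf), st.2)
      | some cur =>
        if info.2 < cur.1 then (st.1.insert info.1 (info.2, etf), st.2) else st
    else st

-- body of `[best[exp][1] for exp in ETF_EXPOSURE_EQUIVALENTS if exp in best]`
def pvOutStepB (best : PySem.Dict String (Int × String)) (out : List String)
    (p : String × List String) : List String :=
  match best.get? p.1 with
  | none => out
  | some c => out ++ [c.2]

def deduplicate_etf_by_exposure_alt (etf_list : List String) (exposures_wanted : Option (List String)) : List String :=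
  let st := etf_list.foldl (pvStepB exposures_wanted)
    ((PySem.Dict.empty : PySem.Dict String (Int × String)), ([] : List String),
     (PySem.Set.empty : PySem.Set String))
  (pvTable.foldl (pvOutStepB st.1) []) ++ st.2.1


-- ===== PRECONDITION & SPEC =====
def Spec_deduplicate_etf_by_exposure (etf_list : List String) (exposures_wanted : Option (List String)) (out : List String) : Prop := out = deduplicate_etf_by_exposure_alt etf_list exposures_wanted
instance (etf_list : List String) (exposures_wanted : Option (List String)) (out : List String) : Decidable (Spec_deduplicate_etf_by_exposure etf_list exposures_wanted out) := by unfold Spec_deduplicate_etf_by_exposure; infer_instance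

-- ===== CLAIM (what is proved, stated in full; the proofs are below) =====
def Claim_equal_deduplicate_etf_by_exposure : Prop := ∀ (etf_list : List String) (exposures_wanted : Option (List String)), Dom_deduplicate_etf_by_exposure etf_list exposures_wanted → Spec_deduplicate_etf_by_exposure etf_list exposures_wanted (deduplicate_etf_by_exposure etf_list exposures_wanted)

-- ===== LEMMAS AND PROOFS =====
def pvAllT : List String := pvTable.foldl (fun acc p => acc ++ p.2) []
def pvFind (etf_list eqs : List String) : Option String :=
  eqs.find? (fun t => decide (t ∈ etf_list))
def pvRefSel (etf_list : List String) (ew : Option (List String)) : List String :=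
  pvTable.filterMap (fun p => if pvWantedB ew p.1 then pvFind etf_list p.2 else none)
def pvRefUnk (etf_list : List String) : List String := etf_list.foldl pvExtStepA []
def pvBest (etf_list eqs : List String) (s : Int) : Option (Int × String) :=
  (PySem.List.enumerate eqs s).find? (fun it => etf_list.contains it.2)

set_option maxRecDepth 200000

lemma pv_keys_eq : pvIndexB.keys = pvAllT := by decide
lemma pv_known_eq : (pvKnownA : List String) = pvAllT := by decide
lemma pv_keyInj : ∀ p ∈ pvTable, ∀ q ∈ pvTable, p.1 = q.1 → p = q := by decide
lemma pv_keysNodup : (pvTable.map Prod.fst).Nodup := by decide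
lemma pv_itemFacts : ∀ it ∈ pvIndexB.items,
    0 ≤ it.2.2 ∧
    (∃ p ∈ pvTable, p.1 = it.2.1 ∧ PySem.List.index? p.2 it.1 = some it.2.2.toNat) ∧
    (∀ q ∈ pvTable, it.1 ∈ q.2 → q.1 = it.2.1) := by decide

lemma pv_mem_allT {p : String × List String} (hp : p ∈ pvTable) {t : String}
    (ht : t ∈ p.2) : t ∈ pvAllT := by
  unfold pvAllT
  rw [PySem.List.foldl_append_eq_flatMap]
  exact List.mem_append_right _ (List.mem_flatMap.mpr ⟨p, hp, ht⟩)


lemma pv_innerA_spec (etf_list : List String) (e : String) :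
    ∀ (eqs sel : List String) (cov : PySem.Set String), e ∉ cov →
      pvInnerA etf_list e eqs (sel, cov) =
        match pvFind etf_list eqs with
        | none => (sel, cov)
        | some t => (sel ++ [t], cov ++ [e])
  | [], sel, cov, h => by simp [pvInnerA, pvFind]
  | etf :: rest, sel, cov, h => by
    by_cases hm : etf ∈ etf_list
    · simp [pvInnerA, pvFind, hm, h, PySem.Set.add, PySem.Set.contains]
    · simp only [pvInnerA, pvFind]
      rw [List.find?_cons_of_neg (by simpa using hm), if_neg (by simp [hm])]
      exact pv_innerA_spec etf_list e rest sel cov h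

-- A's outer loop = filterMap of first-present equivalents
lemma pv_outerA_spec (etf_list : List String) (ew : Option (List String)) :
    ∀ (tbl : List (String × List String)) (sel : List String) (cov : PySem.Set String),
      (tbl.map Prod.fst).Nodup → (∀ p ∈ tbl, p.1 ∉ cov) →
      (tbl.foldl (pvStepA etf_list ew) (sel, cov)).1
        = sel ++ tbl.filterMap (fun p => if pvWantedB ew p.1 then pvFind etf_list p.2 else none)
  | [], sel, cov, hnd, hc => by simp
  | p :: tbl, sel, cov, hnd, hc => by
    rw [List.map_cons, List.nodup_cons] at hnd
    have hskip : (match ew with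
        | none => false
        | some w => !w.isEmpty && !w.contains p.1) = !pvWantedB ew p.1 := by
      cases ew <;> simp [pvWantedB]
    by_cases hw : pvWantedB ew p.1
    · simp only [List.foldl_cons, pvStepA, hskip, hw, Bool.not_true, Bool.false_eq_true,
        if_false]
      rw [pv_innerA_spec etf_list p.1 p.2 sel cov (hc p (by simp))]
      cases hf : pvFind etf_list p.2 with
      | none =>
        simp only [List.filterMap_cons, hw, if_true, hf]
        exact pv_outerA_spec etf_list ew tbl sel cov hnd.2 (fun q hq => hc q (by simp [hq]))
      | some t =>
        simp only [List.filterMap_cons, hw, if_true, hf]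
        rw [pv_outerA_spec etf_list ew tbl (sel ++ [t]) (cov ++ [p.1]) hnd.2 ?_]
        · simp
        · intro q hq
          simp only [List.mem_append, List.mem_singleton]
          exact fun h => h.elim (hc q (by simp [hq]))
            (fun h => hnd.1 (h ▸ List.mem_map_of_mem hq))
    · rw [Bool.not_eq_true] at hw
      simp only [List.foldl_cons, pvStepA, hskip, hw, Bool.not_false, if_true,
        List.filterMap_cons, Bool.false_eq_true, if_false]
      exact pv_outerA_spec etf_list ew tbl sel cov hnd.2 (fun q hq => hc q (by simp [hq]))

-- splitting the extend fold off a prefix of known tickers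
lemma pv_ext_split :
    ∀ (l sel u : List String), (∀ t ∈ sel, t ∈ pvAllT) →
      l.foldl pvExtStepA (sel ++ u) = sel ++ l.foldl pvExtStepA u
  | [], sel, u, hs => by simp
  | t :: l, sel, u, hs => by
    simp only [List.foldl_cons, pvExtStepA, PySem.Set.contains, pv_known_eq]
    by_cases hA : t ∈ pvAllT
    · simp [hA]
      exact pv_ext_split l sel u hs
    · have hsel : t ∉ sel := fun h => hA (hs t h)
      by_cases hu : t ∈ u
      · simp [hA, hu]
        exact pv_ext_split l sel u hs
      · simp [hA, hu, hsel]
        exact pv_ext_split l sel (u ++ [t]) hs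

lemma pv_refSel_sub (etf_list : List String) (ew : Option (List String)) :
    ∀ t ∈ pvRefSel etf_list ew, t ∈ pvAllT := by
  intro t ht
  obtain ⟨p, hp, hpt⟩ := List.mem_filterMap.mp ht
  by_cases hw : pvWantedB ew p.1
  · rw [if_pos hw] at hpt
    exact pv_mem_allT hp (List.mem_of_find?_eq_some hpt)
  · rw [if_neg hw] at hpt; cases hpt

def pvRef (etf_list : List String) (ew : Option (List String)) : List String :=
  pvRefSel etf_list ew ++ pvRefUnk etf_list

lemma pv_A_eq (etf_list : List String) (ew : Option (List String)) :
    deduplicate_etf_by_exposure etf_list ew = pvRef etf_list ew := by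
  unfold deduplicate_etf_by_exposure pvRef pvRefUnk
  show etf_list.foldl pvExtStepA
      (List.foldl (pvStepA etf_list ew) ([], PySem.Set.empty) pvTable).1
    = pvRefSel etf_list ew ++ List.foldl pvExtStepA [] etf_list
  have h1 := pv_outerA_spec etf_list ew pvTable [] PySem.Set.empty pv_keysNodup
    (by intro p _; simp [PySem.Set.empty])
  rw [h1, List.nil_append]
  have := pv_ext_split etf_list (pvRefSel etf_list ew) [] (pv_refSel_sub etf_list ew)
  rw [List.append_nil] at this
  exact this

-- pvBest basics
lemma pv_pvBest_nil (l : List String) (s : Int) : pvBest l [] s = none := by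
  simp [pvBest, PySem.List.enumerate_nil]

lemma pv_pvBest_cons (L : List String) (x : String) (eqs : List String) (s : Int) :
    pvBest L (x :: eqs) s = if x ∈ L then some (s, x) else pvBest L eqs (s + 1) := by
  simp only [pvBest, PySem.List.enumerate_cons, List.find?_cons]
  by_cases hx : x ∈ L <;> simp [hx]

lemma pv_pvFind_cons (L : List String) (x : String) (eqs : List String) :
    pvFind L (x :: eqs) = if x ∈ L then some x else pvFind L eqs := by
  simp only [pvFind, List.find?_cons]
  by_cases hx : x ∈ L <;> simp [hx]

lemma pv_pvBest_lb (l : List String) :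
    ∀ (eqs : List String) (s : Int) (c : Int × String), pvBest l eqs s = some c → s ≤ c.1
  | [], s, c => by simp [pv_pvBest_nil]
  | x :: eqs, s, c => by
    rw [pv_pvBest_cons]
    by_cases hx : x ∈ l
    · simp [hx]; rintro rfl; simp
    · simp only [hx, if_false]
      intro h
      have := pv_pvBest_lb l eqs (s + 1) c h
      omega

lemma pv_pvBest_map_snd (l : List String) :
    ∀ (eqs : List String) (s : Int), (pvBest l eqs s).map (·.2) = pvFind l eqs
  | [], s => by simp [pv_pvBest_nil, pvFind]
  | x :: eqs, s => by
    rw [pv_pvBest_cons, pv_pvFind_cons]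
    by_cases hx : x ∈ l
    · simp [hx]
    · simp only [hx, if_false]
      exact pv_pvBest_map_snd l eqs (s + 1)

lemma pv_pvBest_append_of_not_mem (l : List String) (t : String) :
    ∀ (eqs : List String) (s : Int), t ∉ eqs → pvBest (l ++ [t]) eqs s = pvBest l eqs s
  | [], s, h => by simp [pv_pvBest_nil]
  | x :: eqs, s, h => by
    have hxt : x ≠ t := fun he => h (he ▸ List.mem_cons_self)
    rw [pv_pvBest_cons, pv_pvBest_cons]
    have hxl : x ∈ l ++ [t] ↔ x ∈ l := by simp [hxt]
    by_cases hx : x ∈ l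
    · simp [hx, hxl.mpr hx]
    · simp only [hx, if_false, hxl]
      exact pv_pvBest_append_of_not_mem l t eqs (s + 1) (fun hm => h (List.mem_cons_of_mem _ hm))

-- the crux: appending t to the scanned list updates the minimum-priority choice
lemma pv_pvBest_append (l : List String) (t : String) :
    ∀ (eqs : List String) (k : Nat) (s : Int), PySem.List.index? eqs t = some k →
      pvBest (l ++ [t]) eqs s =
        match pvBest l eqs s with
        | none => some (s + k, t)
        | some c => if s + (k : Int) < c.1 then some (s + (k : Int), t) else some c
  | [], k, s, hk => by simp [PySem.List.index?] at hk
  | x :: eqs, k, s, hk => by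
    by_cases hxt : x = t
    · rw [hxt, PySem.List.index?_cons_self] at hk
      obtain rfl : (0 : Nat) = k := by simpa using hk
      rw [pv_pvBest_cons, pv_pvBest_cons, if_pos (by simp [hxt])]
      by_cases hx : x ∈ l
      · rw [if_pos hx]
        simp [hxt]
      · rw [if_neg hx]
        cases hb : pvBest l eqs (s + 1) with
        | none => simp [hxt]
        | some c =>
          have hlb := pv_pvBest_lb l eqs (s + 1) c hb
          simp only [hxt]
          simp
          intro h; exfalso; omega
    · rw [PySem.List.index?_cons_of_ne _ hxt] at hk
      cases hik : PySem.List.index? eqs t with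
      | none => rw [hik] at hk; simp at hk
      | some k' =>
        rw [hik] at hk
        obtain rfl : k' + 1 = k := by simpa using hk
        have hxl : x ∈ l ++ [t] ↔ x ∈ l := by simp [hxt]
        rw [pv_pvBest_cons, pv_pvBest_cons]
        by_cases hx : x ∈ l
        · rw [if_pos (hxl.mpr hx), if_pos hx]
          simp
          intro h; exfalso; omega
        · rw [if_neg (fun h => hx (hxl.mp h)), if_neg hx]
          rw [pv_pvBest_append l t eqs k' (s + 1) hik]
          cases hb : pvBest l eqs (s + 1) with
          | none => push_cast; ring_nf
          | some c =>
            have harith : s + 1 + (k' : Int) = s + ((k' + 1 : Nat) : Int) := by push_cast; ring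
            simp only [harith]

-- unfolding pvStepB on a known index lookup
lemma pv_stepB_none (ew : Option (List String))
    (st : PySem.Dict String (Int × String) × List String × PySem.Set String)
    (t : String) (h : pvIndexB.get? t = none) :
    pvStepB ew st t =
      if !(PySem.Set.contains st.2.2 t) then
        (st.1, st.2.1 ++ [t], PySem.Set.add st.2.2 t)
      else st := by
  show (match pvIndexB.get? t with
    | none =>
      if !(PySem.Set.contains st.2.2 t) then
        (st.1, st.2.1 ++ [t], PySem.Set.add st.2.2 t)
      else st
    | some info =>
      if pvWantedB ew info.1 then
        match st.1.get? info.1 with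
        | none => (st.1.insert info.1 (info.2, t), st.2)
        | some cur =>
          if info.2 < cur.1 then (st.1.insert info.1 (info.2, t), st.2) else st
      else st) = _
  rw [h]

lemma pv_stepB_some (ew : Option (List String))
    (st : PySem.Dict String (Int × String) × List String × PySem.Set String)
    (t : String) (info : String × Int) (h : pvIndexB.get? t = some info) :
    pvStepB ew st t =
      if pvWantedB ew info.1 then
        match st.1.get? info.1 with
        | none => (st.1.insert info.1 (info.2, t), st.2)
        | some cur =>
          if info.2 < cur.1 then (st.1.insert info.1 (info.2, t), st.2) else st
      else st := by
  show (match pvIndexB.get? t with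
    | none =>
      if !(PySem.Set.contains st.2.2 t) then
        (st.1, st.2.1 ++ [t], PySem.Set.add st.2.2 t)
      else st
    | some info =>
      if pvWantedB ew info.1 then
        match st.1.get? info.1 with
        | none => (st.1.insert info.1 (info.2, t), st.2)
        | some cur =>
          if info.2 < cur.1 then (st.1.insert info.1 (info.2, t), st.2) else st
      else st) = _
  rw [h]

-- B's single pass maintains: unknowns = A's dedup fold, seen = unknowns,
-- and best's entry for each exposure = minimum-priority present equivalent
lemma pv_invB (ew : Option (List String)) (l : List String) :
    (l.foldl (pvStepB ew)
        ((PySem.Dict.empty : PySem.Dict String (Int × String)), ([] : List String),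
         (PySem.Set.empty : PySem.Set String))).2.1 = l.foldl pvExtStepA [] ∧
    ((l.foldl (pvStepB ew)
        ((PySem.Dict.empty : PySem.Dict String (Int × String)), ([] : List String),
         (PySem.Set.empty : PySem.Set String))).2.2 : List String)
      = (l.foldl (pvStepB ew)
        ((PySem.Dict.empty : PySem.Dict String (Int × String)), ([] : List String),
         (PySem.Set.empty : PySem.Set String))).2.1 ∧
    ∀ p ∈ pvTable,
      (l.foldl (pvStepB ew)
        ((PySem.Dict.empty : PySem.Dict String (Int × String)), ([] : List String),
         (PySem.Set.empty : PySem.Set String))).1.get? p.1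
        = if pvWantedB ew p.1 then pvBest l p.2 0 else none := by
  induction l using List.reverseRecOn with
  | nil =>
    refine ⟨rfl, rfl, fun p _ => ?_⟩
    have hnone : pvBest ([] : List String) p.2 0 = none := by
      unfold pvBest
      rw [List.find?_eq_none]
      simp
    simp [hnone, PySem.Dict.get?_empty]
  | append_singleton l t ih =>
    obtain ⟨hu, hs, hb⟩ := ih
    rw [List.foldl_append, List.foldl_append, List.foldl_cons, List.foldl_nil,
      List.foldl_cons, List.foldl_nil]
    set st := l.foldl (pvStepB ew)
        ((PySem.Dict.empty : PySem.Dict String (Int × String)), ([] : List String),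
         (PySem.Set.empty : PySem.Set String)) with hst
    cases hidx : pvIndexB.get? t with
    | none =>
      have htA : t ∉ pvAllT := by
        rw [← pv_keys_eq]
        exact (PySem.Dict.get?_eq_none_iff_not_mem_keys _ _).mp hidx
      have hext : pvExtStepA (l.foldl pvExtStepA []) t
          = if (l.foldl pvExtStepA []).contains t then l.foldl pvExtStepA []
            else l.foldl pvExtStepA [] ++ [t] := by
        simp only [pvExtStepA, PySem.Set.contains, pv_known_eq]
        by_cases hc : (l.foldl pvExtStepA []).contains t <;> simp [htA]
      have hbests : ∀ p ∈ pvTable, pvBest (l ++ [t]) p.2 0 = pvBest l p.2 0 := by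
        intro p hp
        exact pv_pvBest_append_of_not_mem l t p.2 0 (fun hm => htA (pv_mem_allT hp hm))
      rw [pv_stepB_none ew st t hidx]
      by_cases hseen : PySem.Set.contains st.2.2 t
      · have hct : (l.foldl pvExtStepA []).contains t = true := by
          rw [← hu, ← hs]; exact hseen
        rw [if_neg (by simpa using hseen)]
        refine ⟨by rw [hu, hext, if_pos hct], hs, fun p hp => ?_⟩
        rw [hb p hp]
        by_cases hw : pvWantedB ew p.1 <;> simp [hw, hbests p hp]
      · have hseen' : PySem.Set.contains st.2.2 t = false := by simpa using hseen
        have hct : (l.foldl pvExtStepA []).contains t = false := by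
          rw [← hu, ← hs]; exact hseen'
        rw [if_pos (by simpa using hseen')]
        refine ⟨?_, ?_, fun p hp => ?_⟩
        · show st.2.1 ++ [t] = _
          rw [hu, hext, if_neg (by simpa using hct)]
        · show (PySem.Set.add st.2.2 t : List String) = st.2.1 ++ [t]
          rw [hs] at hseen'
          have hm : t ∉ st.2.1 := by simpa using hseen'
          simp [PySem.Set.add, hm, hs]
        · show st.1.get? p.1 = _
          rw [hb p hp]
          by_cases hw : pvWantedB ew p.1 <;> simp [hw, hbests p hp]
    | some info =>
      have hmem := PySem.Dict.mem_items_of_get?_eq_some _ hidx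
      obtain ⟨hpos, ⟨p0, hp0, hp0e, hp0i⟩, huniq⟩ := pv_itemFacts _ hmem
      have htp0 : t ∈ p0.2 := by
        have := PySem.List.index?_isSome_iff (xs := p0.2) (v := t)
        simp only [hp0i] at this
        simpa using this
      have htA : t ∈ pvAllT := pv_mem_allT hp0 htp0
      have hnotherm : ∀ p ∈ pvTable, p.1 ≠ info.1 → t ∉ p.2 := by
        intro p hp hne hm
        exact hne (huniq p hp hm)
      have hext : pvExtStepA (l.foldl pvExtStepA []) t = l.foldl pvExtStepA [] := by
        simp [pvExtStepA, PySem.Set.contains, pv_known_eq, htA]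
      have hcast : ((info.2.toNat : Nat) : Int) = info.2 := Int.toNat_of_nonneg hpos
      have hbapp : pvBest (l ++ [t]) p0.2 0 =
          match pvBest l p0.2 0 with
          | none => some (info.2, t)
          | some c => if info.2 < c.1 then some (info.2, t) else some c := by
        rw [pv_pvBest_append l t p0.2 info.2.toNat 0 hp0i]
        cases pvBest l p0.2 0 with
        | none => simp only [zero_add, hcast]
        | some c => simp only [zero_add, hcast]
      have hother : ∀ p ∈ pvTable, p.1 ≠ info.1 →
          (if pvWantedB ew p.1 then pvBest (l ++ [t]) p.2 0 else none)
            = if pvWantedB ew p.1 then pvBest l p.2 0 else none := by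
        intro p hp hne
        by_cases hwp : pvWantedB ew p.1
        · rw [if_pos hwp, if_pos hwp,
            pv_pvBest_append_of_not_mem l t p.2 0 (hnotherm p hp hne)]
        · simp [hwp]
      rw [pv_stepB_some ew st t info hidx]
      by_cases hw : pvWantedB ew info.1
      · rw [if_pos hw]
        have hbp0 : st.1.get? info.1 = pvBest l p0.2 0 := by
          have h0 := hb p0 hp0
          rw [hp0e, if_pos hw] at h0
          exact h0
        cases hcur : st.1.get? info.1 with
        | none =>
          rw [hbp0] at hcur
          simp only []
          refine ⟨by rw [hu, hext], hs, fun p hp => ?_⟩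
          rw [PySem.Dict.get?_insert]
          by_cases hpe : p.1 = info.1
          · obtain rfl : p = p0 := pv_keyInj p hp p0 hp0 (hpe.trans hp0e.symm)
            rw [if_pos hpe, if_pos (hpe ▸ hw), hbapp, hcur]
          · rw [if_neg hpe, hb p hp, hother p hp hpe]
        | some cur =>
          rw [hbp0] at hcur
          simp only []
          by_cases hlt : info.2 < cur.1
          · rw [if_pos hlt]
            refine ⟨by rw [hu, hext], hs, fun p hp => ?_⟩
            rw [PySem.Dict.get?_insert]
            by_cases hpe : p.1 = info.1
            · obtain rfl : p = p0 := pv_keyInj p hp p0 hp0 (hpe.trans hp0e.symm)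
              rw [if_pos hpe, if_pos (hpe ▸ hw), hbapp, hcur]
              simp only []
              rw [if_pos hlt]
            · rw [if_neg hpe, hb p hp, hother p hp hpe]
          · rw [if_neg hlt]
            refine ⟨by rw [hu, hext], hs, fun p hp => ?_⟩
            by_cases hpe : p.1 = info.1
            · obtain rfl : p = p0 := pv_keyInj p hp p0 hp0 (hpe.trans hp0e.symm)
              rw [hb p hp, if_pos (hpe ▸ hw), if_pos (hpe ▸ hw), hbapp, hcur]
              simp only []
              rw [if_neg hlt]
            · rw [hb p hp, hother p hp hpe]
      · rw [if_neg (by simp [hw])]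
        refine ⟨by rw [hu, hext], hs, fun p hp => ?_⟩
        rw [hb p hp]
        by_cases hwp : pvWantedB ew p.1
        · have hne : p.1 ≠ info.1 := fun he => hw (he ▸ hwp)
          rw [if_pos hwp, if_pos hwp,
            pv_pvBest_append_of_not_mem l t p.2 0 (hnotherm p hp hne)]
        · simp [hwp]

-- emitting the selected tickers in table order
lemma pv_outB (ew : Option (List String)) (etf_list : List String) :
    ∀ (tbl : List (String × List String)) (best : PySem.Dict String (Int × String))
      (out0 : List String),
      (∀ p ∈ tbl, best.get? p.1 = if pvWantedB ew p.1 then pvBest etf_list p.2 0 else none) →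
      tbl.foldl (pvOutStepB best) out0
        = out0 ++ tbl.filterMap (fun p => if pvWantedB ew p.1 then pvFind etf_list p.2 else none)
  | [], best, out0, hb => by simp
  | p :: tbl, best, out0, hb => by
    rw [List.foldl_cons, List.filterMap_cons]
    have hstep : pvOutStepB best out0 p =
        match best.get? p.1 with
        | none => out0
        | some c => out0 ++ [c.2] := rfl
    by_cases hw : pvWantedB ew p.1
    · cases hbst : pvBest etf_list p.2 0 with
      | none =>
        have hfind : pvFind etf_list p.2 = none := by
          rw [← pv_pvBest_map_snd etf_list p.2 0, hbst]; rfl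
        rw [hstep, hb p (by simp), if_pos hw, hbst]
        simp only [hw, if_true, hfind]
        exact pv_outB ew etf_list tbl best out0 (fun q hq => hb q (by simp [hq]))
      | some c =>
        have hfind : pvFind etf_list p.2 = some c.2 := by
          rw [← pv_pvBest_map_snd etf_list p.2 0, hbst]; rfl
        rw [hstep, hb p (by simp), if_pos hw, hbst]
        simp only [hw, if_true, hfind]
        rw [pv_outB ew etf_list tbl best (out0 ++ [c.2]) (fun q hq => hb q (by simp [hq]))]
        simp
    · rw [hstep, hb p (by simp), if_neg hw]
      simp only [hw, Bool.false_eq_true, if_false]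
      exact pv_outB ew etf_list tbl best out0 (fun q hq => hb q (by simp [hq]))

lemma pv_B_eq (etf_list : List String) (ew : Option (List String)) :
    deduplicate_etf_by_exposure_alt etf_list ew = pvRef etf_list ew := by
  unfold deduplicate_etf_by_exposure_alt pvRef pvRefUnk pvRefSel
  obtain ⟨hu, _, hb⟩ := pv_invB ew etf_list
  show (pvTable.foldl (pvOutStepB (etf_list.foldl (pvStepB ew)
      ((PySem.Dict.empty : PySem.Dict String (Int × String)), ([] : List String),
       (PySem.Set.empty : PySem.Set String))).1) [])
    ++ (etf_list.foldl (pvStepB ew)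
      ((PySem.Dict.empty : PySem.Dict String (Int × String)), ([] : List String),
       (PySem.Set.empty : PySem.Set String))).2.1 = _
  rw [pv_outB ew etf_list pvTable _ [] hb, hu, List.nil_append]

theorem pv_final (etf_list : List String) (ew : Option (List String)) :
    deduplicate_etf_by_exposure etf_list ew = deduplicate_etf_by_exposure_alt etf_list ew := by
  rw [pv_A_eq, pv_B_eq]

-- ===== VERDICT (by name: the statement is the Claim_ definition above) =====
theorem deduplicate_etf_by_exposure_spec : Claim_equal_deduplicate_etf_by_exposure := by
  intro etf_list exposures_wanted _
  exact pv_final etf_list exposures_wanted
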